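-- pv_equiv track=rewrite | github.com/JiZhenfei1211/AI-projects | logic_proposition/tt_enumeration.py | is_symbol
-- ===== SOURCE A (Python) =====
-- connective_list = '==> <==> ~ | &'.split(' ')
--
-- def is_symbol(x):
--     if isinstance(x, str) and x[:1].isalpha():
--         for connective in connective_list:
--             if connective in x:
--                 return False
--         return True
--     else:
--         return False
-- ===== SOURCE B (Python) =====
-- def is_symbol(x):
--     # Single left-to-right scan: reject the single-char connectives directly and
--     # detect "==>" (which also covers "<==>") with a run-length counter of '='.
--     if not isinstance(x, str) or not x[:1].isalpha():
--         return False
--     eq = 0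
--     for c in x:
--         if c in '~|&':
--             return False
--         if c == '=':
--             eq += 1
--         else:
--             if c == '>' and eq >= 2:
--                 return False
--             eq = 0
--     return True
-- ===== Notes on version B (the rewrite author's own statement) =====
-- stated objective: alternative
-- what changed: Replaces A's five separate substring-containment scans over the connective list by a single left-to-right character scan that rejects '~'/'|'/'&' directly and detects '==>' (which subsumes '<==>') with a run-length counter of '='.
import Mathlib
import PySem

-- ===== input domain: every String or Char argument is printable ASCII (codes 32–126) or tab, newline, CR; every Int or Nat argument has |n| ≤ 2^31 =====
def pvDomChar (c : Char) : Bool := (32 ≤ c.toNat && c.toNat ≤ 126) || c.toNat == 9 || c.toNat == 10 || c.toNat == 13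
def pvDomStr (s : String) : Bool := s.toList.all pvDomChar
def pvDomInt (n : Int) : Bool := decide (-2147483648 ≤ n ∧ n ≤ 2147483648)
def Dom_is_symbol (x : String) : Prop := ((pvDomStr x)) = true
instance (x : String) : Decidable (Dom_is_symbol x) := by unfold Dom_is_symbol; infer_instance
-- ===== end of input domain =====

-- B replaces A's five separate substring scans by one left-to-right scan with a
-- run-length counter of '=' (objective: alternative single-pass algorithm).

-- ===== PORT A =====
-- connective_list = '==> <==> ~ | &'.split(' ')   (split on ' ' never raises, so getD is exact)
def connective_list : List String := (PySem.Str.split? "==> <==> ~ | &" " ").getD []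

-- the for-loop: return False on the first connective contained in x, True if none is
def is_symbol_loop : List String → String → Bool
  | [], _ => true
  | c :: rest, x => if PySem.Str.isIn c x then false else is_symbol_loop rest x

def is_symbol (x : String) : Bool :=
  if PySem.Str.strIsalpha (PySem.Str.slice x none (some 1)) then
    is_symbol_loop connective_list x
  else
    false

-- ===== PORT B =====
-- B's scan: eq counts the current run of '='; a '>' after a run of ≥ 2 means "==>" occurs
def altScan : List Char → Nat → Bool
  | [], _ => true
  | c :: cs, eq =>
    if c = '~' || c = '|' || c = '&' then false
    else if c = '=' then altScan cs (eq + 1)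
    else if c = '>' && decide (2 ≤ eq) then false
    else altScan cs 0

def is_symbol_alt (x : String) : Bool :=
  if PySem.Str.strIsalpha (PySem.Str.slice x none (some 1)) then
    altScan x.toList 0
  else
    false

-- ===== PRECONDITION & SPEC =====
def Spec_is_symbol (x : String) (out : Bool) : Prop := out = is_symbol_alt x
instance (x : String) (out : Bool) : Decidable (Spec_is_symbol x out) := by unfold Spec_is_symbol; infer_instance

-- ===== CLAIM (what is proved, stated in full; the proofs are below) =====
def Claim_equal_is_symbol : Prop := ∀ (x : String), Dom_is_symbol x → Spec_is_symbol x (is_symbol x)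

-- ===== LEMMAS AND PROOFS =====

-- the pattern "==>" is never a prefix of '='*eq ++ c :: cs when c ≠ '=' and not (c = '>' with eq ≥ 2)
lemma pat_not_prefix (eq : Nat) (c : Char) (cs : List Char)
    (hc : c ≠ '=') (h2 : ¬(c = '>' ∧ 2 ≤ eq)) :
    ¬ (['=', '=', '>'] <+: List.replicate eq '=' ++ c :: cs) := by
  match eq with
  | 0 =>
    intro h
    exact hc (List.cons_prefix_cons.1 h).1.symm
  | 1 =>
    intro h
    simp only [List.replicate_succ, List.replicate_zero, List.nil_append, List.cons_append,
      List.cons_prefix_cons] at h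
    exact hc h.2.1.symm
  | 2 =>
    intro h
    simp only [List.replicate_succ, List.replicate_zero, List.nil_append, List.cons_append,
      List.cons_prefix_cons] at h
    exact h2 ⟨h.2.2.1.symm, by omega⟩
  | (n + 3) =>
    intro h
    simp only [List.replicate_succ, List.cons_append, List.cons_prefix_cons] at h
    have : ('>' : Char) = '=' := by
      have h3 := h.2.2.1
      cases n with
      | zero => simp at h3
      | succ m => simp at h3
    exact absurd this (by decide)

-- crossing the boundary: with the guard, "==>" occurs in '='*eq ++ c :: cs iff it occurs in cs
lemma infix_replicate_cons (eq : Nat) (c : Char) (cs : List Char)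
    (hc : c ≠ '=') (h2 : ¬(c = '>' ∧ 2 ≤ eq)) :
    (['=', '=', '>'] <:+: List.replicate eq '=' ++ c :: cs) ↔ ['=', '=', '>'] <:+: cs := by
  constructor
  · induction eq with
    | zero =>
      intro h
      rcases List.infix_cons_iff.1 (by simpa using h) with hp | h'
      · exact absurd hp (pat_not_prefix 0 c cs hc h2)
      · exact h'
    | succ n ih =>
      intro h
      rw [List.replicate_succ, List.cons_append] at h
      rcases List.infix_cons_iff.1 h with hp | h'
      · exact absurd (by simpa [List.replicate_succ] using hp)
          (pat_not_prefix (n + 1) c cs hc h2)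
      · exact ih (fun ⟨hgt, hle⟩ => h2 ⟨hgt, by omega⟩) h'
  · intro h
    exact h.trans ⟨List.replicate eq '=' ++ [c], [], by simp⟩

-- characterisation of B's scan
lemma altScan_eq (cs : List Char) (eq : Nat) :
    altScan cs eq =
      (!(cs.any (fun c => c = '~' || c = '|' || c = '&'))
        && !(decide (['=', '=', '>'] <:+: List.replicate eq '=' ++ cs))) := by
  induction cs generalizing eq with
  | nil =>
    have hmem : ('>' : Char) ∉ List.replicate eq '=' := by
      intro hm
      exact absurd (List.eq_of_mem_replicate hm) (by decide)
    have hno : ¬ (['=', '=', '>'] <:+: List.replicate eq '=') := by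
      intro h
      exact hmem (h.subset (by simp))
    simp [altScan, hno]
  | cons c cs ih =>
    by_cases hb : (c = '~' || c = '|' || c = '&') = true
    · simp [altScan, hb]
    · by_cases he : c = '='
      · subst he
        have hrep : List.replicate eq '=' ++ '=' :: cs
            = List.replicate (eq + 1) '=' ++ cs := by
          simp [List.replicate_succ']
        rw [show altScan ('=' :: cs) eq = altScan cs (eq + 1) by simp [altScan],
          ih (eq + 1), hrep]
        simp
      · by_cases hg : c = '>' ∧ 2 ≤ eq
        · obtain ⟨rfl, hle⟩ := hg
          have hin : ['=', '=', '>'] <:+: List.replicate eq '=' ++ '>' :: cs := by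
            refine ⟨List.replicate (eq - 2) '=', cs, ?_⟩
            have hsplit : List.replicate eq '=' =
                List.replicate (eq - 2) '=' ++ List.replicate 2 '=' := by
              rw [← List.replicate_add]; congr 1; omega
            simp [hsplit]
          simp only [altScan]
          rw [if_neg (by decide), if_neg he, if_pos (by simp [hle])]
          simp [hin]
        · have hns : altScan (c :: cs) eq = altScan cs 0 := by
            simp only [altScan]
            rw [if_neg (by simpa using hb), if_neg he, if_neg (by
              simp only [Bool.and_eq_true, decide_eq_true_eq]
              rintro ⟨h1, h2⟩
              exact hg ⟨by simpa using h1, h2⟩)]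
          rw [hns, ih 0, Bool.eq_iff_iff]
          simp only [Bool.and_eq_true, Bool.not_eq_true', List.any_eq_false,
            decide_eq_false_iff_not, List.any_cons, Bool.or_eq_false_iff]
          rw [infix_replicate_cons eq c cs he hg]
          constructor
          · rintro ⟨h1, h2⟩
            exact ⟨⟨by simp at hb; exact hb, h1⟩, h2⟩
          · rintro ⟨⟨_, h1⟩, h2⟩
            exact ⟨h1, h2⟩

-- "<==>" in x implies "==>" in x
lemma long_implies_short (l : List Char) (h : ['<', '=', '=', '>'] <:+: l) :
    ['=', '=', '>'] <:+: l :=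
  List.IsInfix.trans ⟨['<'], [], by simp⟩ h

-- 'if c then false else r' as a boolean conjunction (the loop's early return)
lemma if_false_and (a r : Bool) : (if a = true then false else r) = (!a && r) := by
  cases a <;> simp

-- the two loop bodies agree
lemma loop_eq_scan (x : String) :
    is_symbol_loop connective_list x = altScan x.toList 0 := by
  rw [altScan_eq]
  have hc : connective_list = ["==>", "<==>", "~", "|", "&"] := by decide
  have hIn : ∀ sub : String, PySem.Str.isIn sub x = decide (sub.toList <:+: x.toList) := by
    intro sub
    rw [Bool.eq_iff_iff]
    simp [PySem.Chars.isIn_iff_infix]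
  rw [hc]
  simp only [is_symbol_loop, if_false_and, hIn]
  rw [Bool.eq_iff_iff]
  simp only [List.replicate_zero, List.nil_append, Bool.and_eq_true, Bool.not_eq_true',
    List.any_eq_false, Bool.or_eq_true, decide_eq_true_eq, decide_eq_false_iff_not]
  constructor
  · rintro ⟨h1, h2, h3, h4, h5, -⟩
    refine ⟨?_, by simpa using h1⟩
    intro a ha hbad
    rcases hbad with (rfl | rfl) | rfl
    · exact h3 (by simpa using (List.singleton_infix_iff '~' x.toList).2 ha)
    · exact h4 (by simpa using (List.singleton_infix_iff '|' x.toList).2 ha)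
    · exact h5 (by simpa using (List.singleton_infix_iff '&' x.toList).2 ha)
  · rintro ⟨hchars, hpat⟩
    refine ⟨by simpa using hpat, ?_, ?_, ?_, ?_, trivial⟩
    · intro h
      exact hpat (long_implies_short _ (by simpa using h))
    · intro h
      exact hchars '~' ((List.singleton_infix_iff _ _).1 (by simpa using h)) (by simp)
    · intro h
      exact hchars '|' ((List.singleton_infix_iff _ _).1 (by simpa using h)) (by simp)
    · intro h
      exact hchars '&' ((List.singleton_infix_iff _ _).1 (by simpa using h)) (by simp)

-- ===== VERDICT (by name: the statement is the Claim_ definition above) =====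
theorem is_symbol_spec : Claim_equal_is_symbol := by
  intro x _
  unfold Spec_is_symbol is_symbol is_symbol_alt
  split_ifs
  · exact loop_eq_scan x
  · rfl
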